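-- pv_equiv track=rewrite | github.com/ElliottSax/engineer | training_iterations/training_iteration28.py | number_of_distinct_islands
-- ===== SOURCE A (Python) =====
-- def number_of_distinct_islands(grid):
--     """Counts distinct islands by shape."""
--     if not grid:
--         return 0
--     m, n = len(grid), len(grid[0])
--     shapes = set()
--
--     def dfs(r, c, origin_r, origin_c, shape):
--         if r < 0 or r >= m or c < 0 or c >= n or grid[r][c] != 1:
--             return
--         grid[r][c] = 0
--         shape.append((r - origin_r, c - origin_c))
--         dfs(r+1, c, origin_r, origin_c, shape)
--         dfs(r-1, c, origin_r, origin_c, shape)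
--         dfs(r, c+1, origin_r, origin_c, shape)
--         dfs(r, c-1, origin_r, origin_c, shape)
--
--     for i in range(m):
--         for j in range(n):
--             if grid[i][j] == 1:
--                 shape = []
--                 dfs(i, j, i, j, shape)
--                 shapes.add(tuple(shape))
--     return len(shapes)
-- ===== SOURCE B (Python) =====
-- def number_of_distinct_islands(grid):
--     """Counts distinct islands by shape (iterative explicit-stack flood fill)."""
--     if not grid:
--         return 0
--     m, n = len(grid), len(grid[0])
--     shapes = set()
--     for i in range(m):
--         for j in range(n):
--             if grid[i][j] == 1:
--                 shape = []
--                 stack = [(i, j)]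
--                 while stack:
--                     r, c = stack.pop()
--                     if 0 <= r < m and 0 <= c < n and grid[r][c] == 1:
--                         grid[r][c] = 0
--                         shape.append((r - i, c - j))
--                         stack.append((r, c - 1))
--                         stack.append((r, c + 1))
--                         stack.append((r - 1, c))
--                         stack.append((r + 1, c))
--                 shapes.add(tuple(shape))
--     return len(shapes)
-- ===== Notes on version B (the rewrite author's own statement) =====
-- stated objective: alternative
-- what changed: The recursive four-way DFS helper is replaced by an iterative flood fill with an explicit stack (neighbors pushed in reverse order so the pop order matches A's call order); both mutate the grid in place, and the equivalence is about the return value.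
import Mathlib
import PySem

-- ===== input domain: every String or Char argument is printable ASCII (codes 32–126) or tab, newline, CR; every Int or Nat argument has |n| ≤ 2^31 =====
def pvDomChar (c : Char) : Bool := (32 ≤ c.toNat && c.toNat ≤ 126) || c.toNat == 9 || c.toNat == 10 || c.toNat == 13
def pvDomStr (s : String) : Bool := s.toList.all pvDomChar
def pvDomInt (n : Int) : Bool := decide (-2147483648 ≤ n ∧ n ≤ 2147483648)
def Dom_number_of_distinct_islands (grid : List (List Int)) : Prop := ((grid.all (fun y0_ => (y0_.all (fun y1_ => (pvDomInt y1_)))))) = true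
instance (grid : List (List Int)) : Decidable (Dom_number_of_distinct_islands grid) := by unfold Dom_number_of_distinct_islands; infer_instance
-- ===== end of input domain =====

-- B replaces A's recursive four-way DFS by an iterative explicit-stack flood fill (neighbors
-- pushed in reverse order, so pops match A's call order). Both Pythons mutate the grid in place
-- (zeroing visited 1-cells); the equivalence proved here is about the RETURN value.

-- ===== PORT A =====
-- shared cell helpers: grid[r][c] read (some v iff actually in range) and grid[r][c] = v write;
-- under Pre_ every access either Python performs is in range, so these are exact there.
def pvCellGet? (g : List (List Int)) (r c : Int) : Option Int :=
  if r < 0 ∨ c < 0 then none else (g[r.toNat]?).bind fun row => row[c.toNat]?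

def pvCellSet (g : List (List Int)) (r c v : Int) : List (List Int) :=
  g.set r.toNat ((g.getD r.toNat []).set c.toNat v)

-- number of cells equal to 1: fuel bound for A's dfs, termination measure for B's loop
def pvCountOnes (g : List (List Int)) : Nat := (g.map (fun row => row.count 1)).sum

-- the next three lemmas are cited by pvFlood's decreasing_by, so they stay above the ports
theorem pvRowCount_set (row : List Int) : ∀ (j : Nat), row[j]? = some 1 →
    (row.set j 0).count 1 + 1 = row.count 1 := by
  induction row with
  | nil => intro j h; simp at h
  | cons x xs ih =>
    intro j h
    cases j with
    | zero =>
      simp at h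
      simp [List.set, h]
    | succ j =>
      simp at h
      have := ih j h
      simp [List.set, List.count_cons]
      omega

theorem pvCountOnes_set (g : List (List Int)) : ∀ (i : Nat) (row2 : List Int), i < g.length →
    pvCountOnes (g.set i row2) + (g.getD i []).count 1 = pvCountOnes g + row2.count 1 := by
  induction g with
  | nil => intro i _ h; simp at h
  | cons x xs ih =>
    intro i row2 h
    cases i with
    | zero => simp [pvCountOnes]; omega
    | succ i =>
      have := ih i row2 (by simpa using h)
      simp [pvCountOnes, List.set] at this ⊢
      omega

theorem pvCountOnes_cellSet (g : List (List Int)) (r c : Int)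
    (h : pvCellGet? g r c = some 1) :
    pvCountOnes (pvCellSet g r c 0) + 1 = pvCountOnes g := by
  unfold pvCellGet? at h
  split at h
  · simp at h
  · obtain ⟨row, hrow, hcell⟩ := Option.bind_eq_some_iff.mp h
    have hi : r.toNat < g.length := by
      by_contra hn
      rw [List.getElem?_eq_none (by omega)] at hrow; simp at hrow
    have hgd : g.getD r.toNat [] = row := by
      simp [List.getD, hrow]
    have h1 := pvRowCount_set row c.toNat hcell
    have h2 := pvCountOnes_set g r.toNat (row.set c.toNat 0) hi
    unfold pvCellSet
    rw [hgd] at h2 ⊢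
    omega

-- A's dfs helper, with a fuel counter decremented once per productive level; the fuel
-- pvCountOnes g + 1 used at the call site never runs out (productive depth ≤ #ones).
def pvDfsA (fuel : Nat) (g : List (List Int)) (shape : List (Int × Int))
    (oi oj r c m n : Int) : List (List Int) × List (Int × Int) :=
  if r < 0 ∨ m ≤ r ∨ c < 0 ∨ n ≤ c ∨ pvCellGet? g r c ≠ some 1 then (g, shape)
  else
    match fuel with
    | 0 => (g, shape)
    | fuel + 1 =>
      let g1 := pvCellSet g r c 0
      let s1 := shape ++ [(r - oi, c - oj)]
      let p1 := pvDfsA fuel g1 s1 oi oj (r + 1) c m n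
      let p2 := pvDfsA fuel p1.1 p1.2 oi oj (r - 1) c m n
      let p3 := pvDfsA fuel p2.1 p2.2 oi oj r (c + 1) m n
      pvDfsA fuel p3.1 p3.2 oi oj r (c - 1) m n

def number_of_distinct_islands (grid : List (List Int)) : Int :=
  if grid = [] then 0
  else
    let m : Int := grid.length
    let n : Int := (grid.getD 0 []).length
    let res := (PySem.List.pyRange 0 m 1).foldl (fun st i =>
      (PySem.List.pyRange 0 n 1).foldl (fun st j =>
        if pvCellGet? st.1 i j = some 1 then
          let p := pvDfsA (pvCountOnes st.1 + 1) st.1 [] i j i j m n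
          (p.1, PySem.Set.add st.2 p.2)
        else st) st)
      (grid, (PySem.Set.empty : PySem.Set (List (Int × Int))))
    (PySem.Set.len res.2 : Int)

-- ===== PORT B =====
-- B's while loop: pop a cell; if in-bounds land, zero it, record the offset and push the four
-- neighbors (reverse order of A's calls); else drop it. Terminates: a productive pop zeroes a 1.
def pvFlood (g : List (List Int)) (shape : List (Int × Int)) (st : List (Int × Int))
    (oi oj m n : Int) : List (List Int) × List (Int × Int) :=
  match st with
  | [] => (g, shape)
  | (r, c) :: rest =>
    if h : 0 ≤ r ∧ r < m ∧ 0 ≤ c ∧ c < n ∧ pvCellGet? g r c = some 1 then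
      pvFlood (pvCellSet g r c 0) (shape ++ [(r - oi, c - oj)])
        ((r + 1, c) :: (r - 1, c) :: (r, c + 1) :: (r, c - 1) :: rest) oi oj m n
    else
      pvFlood g shape rest oi oj m n
termination_by (pvCountOnes g, st.length)
decreasing_by
  · exact Prod.Lex.left _ _ (by have := pvCountOnes_cellSet g r c h.2.2.2.2; omega)
  · exact Prod.Lex.right _ (by simp)

def number_of_distinct_islands_alt (grid : List (List Int)) : Int :=
  if grid = [] then 0
  else
    let m : Int := grid.length
    let n : Int := (grid.getD 0 []).length
    let res := (PySem.List.pyRange 0 m 1).foldl (fun st i =>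
      (PySem.List.pyRange 0 n 1).foldl (fun st j =>
        if pvCellGet? st.1 i j = some 1 then
          let p := pvFlood st.1 [] [(i, j)] i j m n
          (p.1, PySem.Set.add st.2 p.2)
        else st) st)
      (grid, (PySem.Set.empty : PySem.Set (List (Int × Int))))
    (PySem.Set.len res.2 : Int)

-- ===== PRECONDITION & SPEC =====
-- Pre_ excludes exactly the ragged grids having a row shorter than row 0, on which A (and B)
-- raise IndexError when the scan reaches the missing cell.
def Pre_number_of_distinct_islands (grid : List (List Int)) : Prop :=
  ∀ row ∈ grid, (grid.headD []).length ≤ row.length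
instance (grid : List (List Int)) : Decidable (Pre_number_of_distinct_islands grid) := by
  unfold Pre_number_of_distinct_islands; infer_instance

def pvWitness_number_of_distinct_islands : List (List Int) := [[1, 1, 0], [0, 0, 1]]

def Spec_number_of_distinct_islands (grid : List (List Int)) (out : Int) : Prop := out = number_of_distinct_islands_alt grid
instance (grid : List (List Int)) (out : Int) : Decidable (Spec_number_of_distinct_islands grid out) := by unfold Spec_number_of_distinct_islands; infer_instance

-- ===== CLAIM (what is proved, stated in full; the proofs are below) =====
def Claim_equal_number_of_distinct_islands : Prop := ∀ (grid : List (List Int)), Dom_number_of_distinct_islands grid → Pre_number_of_distinct_islands grid → Spec_number_of_distinct_islands grid (number_of_distinct_islands grid)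

-- ===== LEMMAS AND PROOFS =====

theorem pvDfsA_stop (f : Nat) (g : List (List Int)) (shape : List (Int × Int))
    (oi oj r c m n : Int)
    (h : r < 0 ∨ m ≤ r ∨ c < 0 ∨ n ≤ c ∨ pvCellGet? g r c ≠ some 1) :
    pvDfsA f g shape oi oj r c m n = (g, shape) := by
  rw [pvDfsA.eq_def, if_pos h]

theorem pvDfsA_succ (f : Nat) (g : List (List Int)) (shape : List (Int × Int))
    (oi oj r c m n : Int)
    (h : ¬ (r < 0 ∨ m ≤ r ∨ c < 0 ∨ n ≤ c ∨ pvCellGet? g r c ≠ some 1)) :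
    pvDfsA (f + 1) g shape oi oj r c m n = (pvDfsA f (pvDfsA f (pvDfsA f (pvDfsA f (pvCellSet g r c 0) (shape ++ [(r - oi, c - oj)]) oi oj (r + 1) c m n).1 (pvDfsA f (pvCellSet g r c 0) (shape ++ [(r - oi, c - oj)]) oi oj (r + 1) c m n).2 oi oj (r - 1) c m n).1 (pvDfsA f (pvDfsA f (pvCellSet g r c 0) (shape ++ [(r - oi, c - oj)]) oi oj (r + 1) c m n).1 (pvDfsA f (pvCellSet g r c 0) (shape ++ [(r - oi, c - oj)]) oi oj (r + 1) c m n).2 oi oj (r - 1) c m n).2 oi oj r (c + 1) m n).1 (pvDfsA f (pvDfsA f (pvDfsA f (pvCellSet g r c 0) (shape ++ [(r - oi, c - oj)]) oi oj (r + 1) c m n).1 (pvDfsA f (pvCellSet g r c 0) (shape ++ [(r - oi, c - oj)]) oi oj (r + 1) c m n).2 oi oj (r - 1) c m n).1 (pvDfsA f (pvDfsA f (pvCellSet g r c 0) (shape ++ [(r - oi, c - oj)]) oi oj (r + 1) c m n).1 (pvDfsA f (pvCellSet g r c 0) (shape ++ [(r - oi, c - oj)]) oi oj (r + 1) c m n).2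 oi oj (r - 1) c m n).2 oi oj r (c + 1) m n).2 oi oj r (c - 1) m n) := by
  rw [pvDfsA.eq_def, if_neg h]

-- the DFS never creates new ones
theorem pvDfsA_countOnes_le (fuel : Nat) : ∀ (g : List (List Int)) (shape : List (Int × Int)) (oi oj r c m n : Int),
    pvCountOnes (pvDfsA fuel g shape oi oj r c m n).1 ≤ pvCountOnes g := by
  induction fuel with
  | zero =>
    intro g shape oi oj r c m n
    unfold pvDfsA
    split <;> simp
  | succ fuel ih =>
    intro g shape oi oj r c m n
    by_cases hc : r < 0 ∨ m ≤ r ∨ c < 0 ∨ n ≤ c ∨ pvCellGet? g r c ≠ some 1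
    · rw [pvDfsA_stop _ _ _ _ _ _ _ _ _ hc]
    · rw [pvDfsA_succ _ _ _ _ _ _ _ _ _ hc]
      have hget : pvCellGet? g r c = some 1 := by
        by_contra hx
        exact hc (Or.inr (Or.inr (Or.inr (Or.inr hx))))
      have hcnt := pvCountOnes_cellSet g r c hget
      have h1 := ih (pvCellSet g r c 0) (shape ++ [(r - oi, c - oj)]) oi oj (r + 1) c m n
      have h2 := ih (pvDfsA fuel (pvCellSet g r c 0) (shape ++ [(r - oi, c - oj)]) oi oj (r + 1) c m n).1 (pvDfsA fuel (pvCellSet g r c 0) (shape ++ [(r - oi, c - oj)]) oi oj (r + 1) c m n).2 oi oj (r - 1) c m n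
      have h3 := ih (pvDfsA fuel (pvDfsA fuel (pvCellSet g r c 0) (shape ++ [(r - oi, c - oj)]) oi oj (r + 1) c m n).1 (pvDfsA fuel (pvCellSet g r c 0) (shape ++ [(r - oi, c - oj)]) oi oj (r + 1) c m n).2 oi oj (r - 1) c m n).1 (pvDfsA fuel (pvDfsA fuel (pvCellSet g r c 0) (shape ++ [(r - oi, c - oj)]) oi oj (r + 1) c m n).1 (pvDfsA fuel (pvCellSet g r c 0) (shape ++ [(r - oi, c - oj)]) oi oj (r + 1) c m n).2 oi oj (r - 1) c m n).2 oi oj r (c + 1) m n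
      have h4 := ih (pvDfsA fuel (pvDfsA fuel (pvDfsA fuel (pvCellSet g r c 0) (shape ++ [(r - oi, c - oj)]) oi oj (r + 1) c m n).1 (pvDfsA fuel (pvCellSet g r c 0) (shape ++ [(r - oi, c - oj)]) oi oj (r + 1) c m n).2 oi oj (r - 1) c m n).1 (pvDfsA fuel (pvDfsA fuel (pvCellSet g r c 0) (shape ++ [(r - oi, c - oj)]) oi oj (r + 1) c m n).1 (pvDfsA fuel (pvCellSet g r c 0) (shape ++ [(r - oi, c - oj)]) oi oj (r + 1) c m n).2 oi oj (r - 1) c m n).2 oi oj r (c + 1) m n).1 (pvDfsA fuel (pvDfsA fuel (pvDfsA fuel (pvCellSet g r c 0) (shape ++ [(r - oi, c - oj)]) oi oj (r + 1) c m n).1 (pvDfsA fuel (pvCellSet g r c 0) (shape ++ [(r - oi, c - oj)]) oi oj (r + 1) c m n).2 oi oj (r - 1) c m n).1 (pvDfsA fuel (pvDfsA fuel (pvCellSet g r c 0) (shape ++ [(r - oi, c - oj)]) oi oj (r + 1) c m n).1 (pvDfsA fuel (pvCellSet g r c 0) (shape ++ [(r - oi, c - oj)]) oi oj (r + 1) c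 m n).2 oi oj (r - 1) c m n).2 oi oj r (c + 1) m n).2 oi oj r (c - 1) m n
      omega

-- Bridge: popping (r, c) and draining its whole subtree equals one recursive dfs call.
theorem pvFlood_eq_pvDfsA (N : Nat) : ∀ g, pvCountOnes g ≤ N →
    ∀ (f : Nat) (shape : List (Int × Int)) (r c : Int) (rest : List (Int × Int)) (oi oj m n : Int), pvCountOnes g < f →
    pvFlood g shape ((r, c) :: rest) oi oj m n =
      pvFlood (pvDfsA f g shape oi oj r c m n).1 (pvDfsA f g shape oi oj r c m n).2
        rest oi oj m n := by
  induction N using Nat.strong_induction_on with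
  | _ N ih =>
    intro g hN f shape r c rest oi oj m n hf
    by_cases hc : 0 ≤ r ∧ r < m ∧ 0 ≤ c ∧ c < n ∧ pvCellGet? g r c = some 1
    · have hget := hc.2.2.2.2
      have hcnt := pvCountOnes_cellSet g r c hget
      obtain ⟨f', rfl⟩ : ∃ f', f = f' + 1 := ⟨f - 1, by omega⟩
      have hnc : ¬ (r < 0 ∨ m ≤ r ∨ c < 0 ∨ n ≤ c ∨ pvCellGet? g r c ≠ some 1) := by
        simp only [not_or, not_lt, not_le, not_not]
        exact ⟨by omega, by omega, by omega, by omega, hget⟩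
      rw [pvFlood, dif_pos hc, pvDfsA_succ _ _ _ _ _ _ _ _ _ hnc]
      have hle1 := pvDfsA_countOnes_le f' (pvCellSet g r c 0) (shape ++ [(r - oi, c - oj)]) oi oj (r + 1) c m n
      have hle2 := pvDfsA_countOnes_le f' (pvDfsA f' (pvCellSet g r c 0) (shape ++ [(r - oi, c - oj)]) oi oj (r + 1) c m n).1 (pvDfsA f' (pvCellSet g r c 0) (shape ++ [(r - oi, c - oj)]) oi oj (r + 1) c m n).2 oi oj (r - 1) c m n
      have hle3 := pvDfsA_countOnes_le f' (pvDfsA f' (pvDfsA f' (pvCellSet g r c 0) (shape ++ [(r - oi, c - oj)]) oi oj (r + 1) c m n).1 (pvDfsA f' (pvCellSet g r c 0) (shape ++ [(r - oi, c - oj)]) oi oj (r + 1) c m n).2 oi oj (r - 1) c m n).1 (pvDfsA f' (pvDfsA f' (pvCellSet g r c 0) (shape ++ [(r - oi, c - oj)]) oi oj (r + 1) c m n).1 (pvDfsA f' (pvCellSet g r c 0) (shape ++ [(r - oi, c - oj)]) oi oj (r + 1) c m n).2 oi oj (r - 1) c m n).2 oi oj r (c + 1) m n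
      rw [ih (pvCountOnes (pvCellSet g r c 0)) (by omega) (pvCellSet g r c 0) le_rfl f' (shape ++ [(r - oi, c - oj)]) (r + 1) c ((r - 1, c) :: (r, c + 1) :: (r, c - 1) :: rest) oi oj m n (by omega)]
      rw [ih (pvCountOnes (pvCellSet g r c 0)) (by omega) (pvDfsA f' (pvCellSet g r c 0) (shape ++ [(r - oi, c - oj)]) oi oj (r + 1) c m n).1 hle1 f' (pvDfsA f' (pvCellSet g r c 0) (shape ++ [(r - oi, c - oj)]) oi oj (r + 1) c m n).2 (r - 1) c ((r, c + 1) :: (r, c - 1) :: rest) oi oj m n (by omega)]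
      rw [ih (pvCountOnes (pvCellSet g r c 0)) (by omega) (pvDfsA f' (pvDfsA f' (pvCellSet g r c 0) (shape ++ [(r - oi, c - oj)]) oi oj (r + 1) c m n).1 (pvDfsA f' (pvCellSet g r c 0) (shape ++ [(r - oi, c - oj)]) oi oj (r + 1) c m n).2 oi oj (r - 1) c m n).1 (le_trans hle2 hle1) f' (pvDfsA f' (pvDfsA f' (pvCellSet g r c 0) (shape ++ [(r - oi, c - oj)]) oi oj (r + 1) c m n).1 (pvDfsA f' (pvCellSet g r c 0) (shape ++ [(r - oi, c - oj)]) oi oj (r + 1) c m n).2 oi oj (r - 1) c m n).2 r (c + 1) ((r, c - 1) :: rest) oi oj m n (by omega)]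
      rw [ih (pvCountOnes (pvCellSet g r c 0)) (by omega) (pvDfsA f' (pvDfsA f' (pvDfsA f' (pvCellSet g r c 0) (shape ++ [(r - oi, c - oj)]) oi oj (r + 1) c m n).1 (pvDfsA f' (pvCellSet g r c 0) (shape ++ [(r - oi, c - oj)]) oi oj (r + 1) c m n).2 oi oj (r - 1) c m n).1 (pvDfsA f' (pvDfsA f' (pvCellSet g r c 0) (shape ++ [(r - oi, c - oj)]) oi oj (r + 1) c m n).1 (pvDfsA f' (pvCellSet g r c 0) (shape ++ [(r - oi, c - oj)]) oi oj (r + 1) c m n).2 oi oj (r - 1) c m n).2 oi oj r (c + 1) m n).1 (le_trans hle3 (le_trans hle2 hle1)) f' (pvDfsA f' (pvDfsA f' (pvDfsA f' (pvCellSet g r c 0) (shape ++ [(r - oi, c - oj)]) oi oj (r + 1) c m n).1 (pvDfsA f' (pvCellSet g r c 0) (shape ++ [(r - oi, c - oj)]) oi oj (r + 1) c m n).2 oi oj (r - 1) c m n).1 (pvDfsA f' (pvDfsA f' (pvCellSet g r c 0) (shape ++ [(r - oi, c - oj)]) oi oj (r + 1) c m n).1 (pvDfsA f' (pvCellSet g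 r c 0) (shape ++ [(r - oi, c - oj)]) oi oj (r + 1) c m n).2 oi oj (r - 1) c m n).2 oi oj r (c + 1) m n).2 r (c - 1) rest oi oj m n (by omega)]
    · have hnc : r < 0 ∨ m ≤ r ∨ c < 0 ∨ n ≤ c ∨ pvCellGet? g r c ≠ some 1 := by
        by_contra h
        simp only [not_or, not_lt, not_le, not_not] at h
        exact hc ⟨by omega, by omega, by omega, by omega, h.2.2.2.2⟩
      rw [pvFlood, dif_neg hc, pvDfsA_stop _ _ _ _ _ _ _ _ _ hnc]

theorem pvFlood_nil (g : List (List Int)) (shape : List (Int × Int)) (oi oj m n : Int) :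
    pvFlood g shape [] oi oj m n = (g, shape) := by
  rw [pvFlood]

-- one island start: A's dfs call and B's whole stack drain take the state to the same place
theorem pvIsland_eq (m n : Int) (st : List (List Int) × PySem.Set (List (Int × Int))) (i j : Int) :
    (if pvCellGet? st.1 i j = some 1 then
       ((pvDfsA (pvCountOnes st.1 + 1) st.1 [] i j i j m n).1,
        PySem.Set.add st.2 (pvDfsA (pvCountOnes st.1 + 1) st.1 [] i j i j m n).2)
     else st)
    = (if pvCellGet? st.1 i j = some 1 then
       ((pvFlood st.1 [] [(i, j)] i j m n).1,
        PySem.Set.add st.2 (pvFlood st.1 [] [(i, j)] i j m n).2)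
     else st) := by
  split
  · have h := pvFlood_eq_pvDfsA (pvCountOnes st.1) st.1 le_rfl (pvCountOnes st.1 + 1)
      [] i j [] i j m n (by omega)
    rw [pvFlood_nil] at h
    rw [h]
  · rfl

theorem pvInner_eq (m n i : Int) :
    (fun (st : List (List Int) × PySem.Set (List (Int × Int))) (j : Int) =>
      if pvCellGet? st.1 i j = some 1 then
        ((pvDfsA (pvCountOnes st.1 + 1) st.1 [] i j i j m n).1,
         PySem.Set.add st.2 (pvDfsA (pvCountOnes st.1 + 1) st.1 [] i j i j m n).2)
      else st)
    = (fun (st : List (List Int) × PySem.Set (List (Int × Int))) (j : Int) =>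
      if pvCellGet? st.1 i j = some 1 then
        ((pvFlood st.1 [] [(i, j)] i j m n).1,
         PySem.Set.add st.2 (pvFlood st.1 [] [(i, j)] i j m n).2)
      else st) := by
  funext st j
  exact pvIsland_eq m n st i j

-- ===== VERDICT (by name: the statement is the Claim_ definition above) =====
theorem number_of_distinct_islands_spec : Claim_equal_number_of_distinct_islands := by
  intro grid _ _
  unfold Spec_number_of_distinct_islands
  by_cases h : grid = []
  · simp [number_of_distinct_islands, number_of_distinct_islands_alt, h]
  · simp only [number_of_distinct_islands, number_of_distinct_islands_alt, if_neg h, pvInner_eq]
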